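-- pv_equiv track=rewrite | github.com/TessFerrandez/algorithms | contest/bw-86/lc-e-2395-find-subarrays-with-equal-sum.py | findSubarrays
-- ===== SOURCE A (Python) =====
-- from typing import List
--
-- def findSubarrays(nums: List[int]) -> bool:
--     sums = set()
--     for i in range(len(nums) - 1):
--         the_sum = nums[i] + nums[i + 1]
--         if the_sum in sums:
--             return True
--         sums.add(the_sum)
--
--     return False
-- ===== SOURCE B (Python) =====
-- def findSubarrays(nums):
--     sums = sorted(a + b for a, b in zip(nums, nums[1:]))
--     return any(x == y for x, y in zip(sums, sums[1:]))
-- ===== Notes on version B (the rewrite author's own statement) =====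
-- stated objective: alternative
-- what changed: Replaces A's hash-set duplicate detection with sort-then-scan: build all adjacent-pair sums, sort them, and report whether any two neighbouring sorted sums are equal; no set is used at all.
import Mathlib
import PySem

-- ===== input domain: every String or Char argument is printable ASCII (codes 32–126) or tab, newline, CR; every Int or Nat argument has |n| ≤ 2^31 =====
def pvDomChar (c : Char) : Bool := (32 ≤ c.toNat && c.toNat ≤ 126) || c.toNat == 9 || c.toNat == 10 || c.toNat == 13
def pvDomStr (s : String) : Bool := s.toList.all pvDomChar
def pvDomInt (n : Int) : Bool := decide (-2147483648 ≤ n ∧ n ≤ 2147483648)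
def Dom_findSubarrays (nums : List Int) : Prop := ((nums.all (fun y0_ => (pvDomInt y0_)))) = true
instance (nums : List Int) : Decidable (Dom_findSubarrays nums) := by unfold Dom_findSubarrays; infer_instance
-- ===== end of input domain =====

-- B replaces A's growing hash set and early-return loop with sort-then-scan:
-- it sorts the adjacent-pair sums and checks whether any two neighbours of the
-- sorted list are equal (objective: alternative; no set is used).

-- ===== PORT A =====
-- the loop 'for i in range(len(nums) - 1)' with the early 'return True';
-- nums[i] and nums[i+1] are ported as pyGetD (the range keeps every index in bounds, so this is exact)
def findSubarraysLoop (nums : List Int) : List Int → PySem.Set Int → Bool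
  | [], _ => false
  | i :: rest, sums =>
    let theSum := PySem.List.pyGetD nums i 0 + PySem.List.pyGetD nums (i + 1) 0
    if PySem.Set.contains sums theSum then true
    else findSubarraysLoop nums rest (PySem.Set.add sums theSum)

def findSubarrays (nums : List Int) : Bool :=
  findSubarraysLoop nums (PySem.List.pyRange 0 ((nums.length : Int) - 1)) PySem.Set.empty

-- ===== PORT B =====
def findSubarrays_alt (nums : List Int) : Bool :=
  let sums := PySem.List.sorted ((nums.zip (PySem.List.slice nums (some 1) none)).map (fun p => p.1 + p.2)) (fun x => x) false
  (sums.zip (PySem.List.slice sums (some 1) none)).any (fun p => p.1 == p.2)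

-- ===== PRECONDITION & SPEC =====
def Spec_findSubarrays (nums : List Int) (out : Bool) : Prop := out = findSubarrays_alt nums
instance (nums : List Int) (out : Bool) : Decidable (Spec_findSubarrays nums out) := by unfold Spec_findSubarrays; infer_instance

-- ===== CLAIM (what is proved, stated in full; the proofs are below) =====
def Claim_equal_findSubarrays : Prop := ∀ (nums : List Int), Dom_findSubarrays nums → Spec_findSubarrays nums (findSubarrays nums)

-- ===== LEMMAS AND PROOFS =====

-- A's loop over any index list returns true iff the mapped sums list has an internal
-- duplicate or hits the accumulated set
theorem findSubarraysLoop_eq (nums : List Int) (il : List Int) (s : PySem.Set Int) :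
    findSubarraysLoop nums il s =
      decide (¬ (il.map (fun i => PySem.List.pyGetD nums i 0 + PySem.List.pyGetD nums (i + 1) 0)).Nodup
        ∨ ∃ x ∈ il.map (fun i => PySem.List.pyGetD nums i 0 + PySem.List.pyGetD nums (i + 1) 0), x ∈ s) := by
  induction il generalizing s with
  | nil => simp [findSubarraysLoop]
  | cons i rest ih =>
    simp only [findSubarraysLoop, List.map_cons]
    by_cases h : PySem.Set.contains s (PySem.List.pyGetD nums i 0 + PySem.List.pyGetD nums (i + 1) 0)
    · rw [if_pos h]
      have hm : (PySem.List.pyGetD nums i 0 + PySem.List.pyGetD nums (i + 1) 0) ∈ s := by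
        simpa [PySem.Set.contains] using h
      symm; simp only [decide_eq_true_iff]
      exact Or.inr ⟨_, by simp, hm⟩
    · rw [if_neg h, ih]
      have hm : (PySem.List.pyGetD nums i 0 + PySem.List.pyGetD nums (i + 1) 0) ∉ s := by
        simpa [PySem.Set.contains] using h
      have hadd : ∀ y, y ∈ s.add (PySem.List.pyGetD nums i 0 + PySem.List.pyGetD nums (i + 1) 0) ↔
          y ∈ s ∨ y = PySem.List.pyGetD nums i 0 + PySem.List.pyGetD nums (i + 1) 0 :=
        fun y => PySem.Set.mem_add s _ y
      simp only [decide_eq_decide, hadd, List.nodup_cons, List.mem_cons]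
      constructor
      · rintro (hnd | ⟨x, hx, hxs | hxe⟩)
        · exact Or.inl (fun hc => hnd hc.2)
        · exact Or.inr ⟨x, Or.inr hx, hxs⟩
        · subst hxe; exact Or.inl (fun hc => hc.1 hx)
      · rintro (hnd | ⟨x, hx | hx, hxs⟩)
        · by_cases hmem : (PySem.List.pyGetD nums i 0 + PySem.List.pyGetD nums (i + 1) 0) ∈ rest.map (fun i => PySem.List.pyGetD nums i 0 + PySem.List.pyGetD nums (i + 1) 0)
          · exact Or.inr ⟨_, hmem, Or.inr rfl⟩
          · exact Or.inl (fun hnd' => hnd ⟨hmem, hnd'⟩)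
        · subst hx; exact absurd hxs hm
        · exact Or.inr ⟨x, hx, Or.inl hxs⟩

-- the index-loop sums list equals the zip sums list
theorem sums_lists_eq (nums : List Int) :
    (PySem.List.pyRange 0 ((nums.length : Int) - 1)).map
        (fun i => PySem.List.pyGetD nums i 0 + PySem.List.pyGetD nums (i + 1) 0)
      = (nums.zip (PySem.List.slice nums (some 1) none)).map (fun p => p.1 + p.2) := by
  cases nums with
  | nil => decide
  | cons x t =>
    have h1 : ((x :: t).length : Int) - 1 = (t.length : Int) := by simp
    have h2 : PySem.List.slice (x :: t) (some (1 : Int)) none = t := by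
      have := PySem.List.slice_from_natCast (x :: t) 1
      simpa using this
    rw [h1, h2, PySem.List.pyRange_zero_natCast, List.map_map]
    apply List.ext_getElem
    · simp
    · intro j hj1 hj2
      simp only [List.getElem_map, List.getElem_zip, Function.comp,
        List.getElem_range]
      have hjt : j < t.length := by simpa using hj2
      have hc : ((j : Int) + 1) = ((j + 1 : Nat) : Int) := by push_cast; ring
      rw [PySem.List.pyGetD_natCast, hc, PySem.List.pyGetD_natCast]
      have e1 : (x :: t).getD j 0 = (x :: t)[j]'(by simp; omega) := List.getD_eq_getElem _ _ _
      have e2 : (x :: t).getD (j + 1) 0 = (x :: t)[j + 1]'(by simp; omega) := List.getD_eq_getElem _ _ _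
      rw [e1, e2]
      have : (x :: t)[j + 1]'(by simp; omega) = t[j]'hjt := by simp
      rw [this]

-- slicing from 1 is the tail
theorem slice_one_eq_tail (xs : List Int) :
    PySem.List.slice xs (some (1 : Int)) none = xs.tail := by
  have := PySem.List.slice_from_natCast xs 1
  simpa [List.drop_one] using this

-- in a ≤-sorted list, some adjacent pair is equal iff the list has a duplicate
theorem adj_eq_iff_not_nodup :
    ∀ (S : List Int), S.Pairwise (· ≤ ·) →
      ((S.zip S.tail).any (fun p => p.1 == p.2)) = decide (¬ S.Nodup) := by
  intro S
  induction S with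
  | nil => intro _; simp
  | cons x t ih =>
    intro hp
    cases t with
    | nil => simp
    | cons y u =>
      have hp' : (y :: u).Pairwise (· ≤ ·) := hp.of_cons
      have hxy : x ≤ y := (List.pairwise_cons.mp hp).1 y (List.mem_cons_self)
      have hxu : ∀ z ∈ u, x ≤ z := fun z hz =>
        (List.pairwise_cons.mp hp).1 z (List.mem_cons_of_mem _ hz)
      have htail := ih hp'
      simp only [List.tail_cons, List.zip_cons_cons, List.any_cons] at htail ⊢
      rw [htail]
      by_cases hxey : x = y
      · subst hxey
        simp [List.nodup_cons]
      · have hxnm : x ∉ y :: u := by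
          intro hmem
          rcases List.mem_cons.mp hmem with rfl | hmu
          · exact hxey rfl
          · have hyx : y ≤ x := (List.pairwise_cons.mp hp').1 x hmu
            exact hxey (le_antisymm hxy hyx)
        have : (x == y) = false := by simp [hxey]
        simp only [this, Bool.false_or, decide_eq_decide, List.nodup_cons]
        tauto

-- ===== VERDICT (by name: the statement is the Claim_ definition above) =====
theorem findSubarrays_spec : Claim_equal_findSubarrays := by
  intro nums _
  unfold Spec_findSubarrays findSubarrays findSubarrays_alt
  rw [findSubarraysLoop_eq, sums_lists_eq]
  set L := (nums.zip (PySem.List.slice nums (some 1) none)).map (fun p => p.1 + p.2) with hL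
  set S := PySem.List.sorted L (fun x => x) false with hS
  have hperm : S.Perm L := PySem.List.sorted_perm L (fun x => x) false
  have hpw : S.Pairwise (· ≤ ·) := by
    have := PySem.List.sorted_pairwise L (fun x => x)
    simpa [hS] using this
  show _ = (S.zip (PySem.List.slice S (some 1) none)).any (fun p => p.1 == p.2)
  rw [slice_one_eq_tail, adj_eq_iff_not_nodup S hpw]
  have hnd : S.Nodup ↔ L.Nodup := hperm.nodup_iff
  simp only [decide_eq_decide, hnd, PySem.Set.empty]
  constructor
  · rintro (h | ⟨x, _, hx⟩)
    · exact h
    · exact absurd hx (List.not_mem_nil)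
  · exact Or.inl
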